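-- pv_equiv track=rewrite | github.com/jombaek/0_0_python | cub.py | turns_for_win
-- ===== SOURCE A (Python) =====
-- memory = { '0' : None }
--
-- def turns_for_win(combination):
--     turns = 0
--     new_combination = '' + combination[turns]
--     while turns < len(combination):
--         if new_combination in memory:
--             return turns + 1
--         new_combination += combination[turns]
--         turns += 1
--     return 0
-- ===== SOURCE B (Python) =====
-- def turns_for_win(combination):
--     # Only the first character ever matters: the memory dict's sole key is '0',
--     # and new_combination has length >= 2 after the first iteration.
--     return 1 if combination[0] == '0' else 0
-- ===== Notes on version B (the rewrite author's own statement) =====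
-- stated objective: faster
-- what changed: Replaced the while-loop over a growing prefix string and the memory dict by a constant-time closed form: the loop can only ever match the single key '0' at the first iteration, so B just tests combination[0] == '0'.
import Mathlib
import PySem

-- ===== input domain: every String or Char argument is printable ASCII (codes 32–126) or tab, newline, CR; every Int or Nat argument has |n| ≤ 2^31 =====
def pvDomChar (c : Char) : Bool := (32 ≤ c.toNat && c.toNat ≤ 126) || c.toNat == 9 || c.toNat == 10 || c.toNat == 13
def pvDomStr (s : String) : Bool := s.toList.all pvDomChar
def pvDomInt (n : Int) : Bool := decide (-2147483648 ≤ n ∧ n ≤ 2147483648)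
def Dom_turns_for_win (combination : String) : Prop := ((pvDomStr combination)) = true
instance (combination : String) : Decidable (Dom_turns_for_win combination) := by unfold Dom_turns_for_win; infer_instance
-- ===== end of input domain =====

-- B replaces A's while-loop and memory dict by a constant-time test of the first
-- character (objective: simpler); return value only, neither program mutates anything.

-- ===== PORT A =====
-- the while-loop of A; `new_combination in memory` is newc = "0", the dict's only key
def pvTurnsLoop (cs : List Char) (newc : List Char) (turns : Nat) : Int :=
  if turns < cs.length then
    if newc = ['0'] then (turns : Int) + 1
    else
      match PySem.List.pyGet? cs (turns : Int) with
      | none => 0            -- unreachable: turns < len(combination)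
      | some c => pvTurnsLoop cs (newc ++ [c]) (turns + 1)
  else 0
termination_by cs.length - turns

def turns_for_win (combination : String) : Int :=
  match PySem.List.pyGet? combination.toList 0 with
  | none => 0                -- IndexError in Python: excluded by Pre_
  | some c => pvTurnsLoop combination.toList ([] ++ [c]) 0

-- ===== PORT B =====
def turns_for_win_alt (combination : String) : Int :=
  match PySem.List.pyGet? combination.toList 0 with
  | none => 0                -- IndexError in Python: excluded by Pre_
  | some c => if c = '0' then 1 else 0

-- ===== PRECONDITION & SPEC =====
-- A raises IndexError on the empty string (combination[0]); excluded.
def Pre_turns_for_win (combination : String) : Prop := combination ≠ ""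
instance (combination : String) : Decidable (Pre_turns_for_win combination) := by
  unfold Pre_turns_for_win; infer_instance
def pvWitness_turns_for_win : String := "012"

def Spec_turns_for_win (combination : String) (out : Int) : Prop := out = turns_for_win_alt combination
instance (combination : String) (out : Int) : Decidable (Spec_turns_for_win combination out) := by unfold Spec_turns_for_win; infer_instance

-- ===== CLAIM (what is proved, stated in full; the proofs are below) =====
def Claim_equal_turns_for_win : Prop := ∀ (combination : String), Dom_turns_for_win combination → Pre_turns_for_win combination → Spec_turns_for_win combination (turns_for_win combination)

-- ===== LEMMAS AND PROOFS =====
-- once new_combination has length ≥ 2 it can never equal the 1-char key '0'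
theorem pvTurnsLoop_long (cs : List Char) (k : Nat) :
    ∀ (turns : Nat) (newc : List Char), cs.length - turns ≤ k → 2 ≤ newc.length →
      pvTurnsLoop cs newc turns = 0 := by
  induction k with
  | zero =>
    intro turns newc hk _
    unfold pvTurnsLoop
    rw [if_neg (by omega)]
  | succ k ih =>
    intro turns newc hk hlen
    unfold pvTurnsLoop
    by_cases h : turns < cs.length
    · rw [if_pos h, if_neg (by intro he; rw [he] at hlen; simp at hlen)]
      have hget : PySem.List.pyGet? cs (turns : Int) = cs[turns]? :=
        PySem.List.pyGet?_natCast cs turns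
      rw [hget, List.getElem?_eq_getElem h]
      exact ih (turns + 1) (newc ++ [cs[turns]]) (by omega) (by simp; omega)
    · rw [if_neg h]

-- ===== VERDICT (by name: the statement is the Claim_ definition above) =====
theorem turns_for_win_spec : Claim_equal_turns_for_win := by
  intro combination _ hpre
  unfold Spec_turns_for_win turns_for_win turns_for_win_alt
  have hne : combination.toList ≠ [] :=
    fun he => hpre (String.toList_eq_nil_iff.mp he)
  obtain ⟨c, rest, hcs⟩ := List.exists_cons_of_ne_nil hne
  rw [hcs]
  simp only [PySem.List.pyGet?_zero_cons, List.nil_append]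
  unfold pvTurnsLoop
  rw [if_pos (by simp)]
  by_cases hc : c = '0'
  · rw [hc]; simp
  · rw [if_neg (by simpa using hc), if_neg hc]
    simp only [PySem.List.pyGet?_natCast, List.getElem?_cons_zero]
    exact pvTurnsLoop_long (c :: rest) (rest.length) 1 [c, c] (by simp) (by simp)
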